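-- pv_equiv track=rewrite | github.com/VPTran2002/nerfstudio | parse_h5py.py | sort_indices_with_duplicates
-- ===== SOURCE A (Python) =====
-- def sort_indices_with_duplicates(a1, a2):
--     # Step 1: Create a mapping from elements of a1 to their first occurrence index
--     order_dict = {}
--     for idx, val in enumerate(a1):
--         if val not in order_dict:
--             order_dict[val] = idx
--
--     # Step 2: Create a list of tuples (value, index) for a2
--     indexed_a2 = [(val, idx) for idx, val in enumerate(a2)]
--
--     # Step 3: Sort indexed_a2 based on the order in a1
--     sorted_indexed_a2 = sorted(indexed_a2, key=lambda x: order_dict[x[0]])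
--
--     # Step 4: Extract the sorted indices
--     sorted_indices = [idx for val, idx in sorted_indexed_a2]
--
--     return sorted_indices
-- ===== SOURCE B (Python) =====
-- def sort_indices_with_duplicates(a1, a2):
--     # One bucket per distinct a1 value, in first-occurrence order
--     # (dicts preserve insertion order); then a single pass over a2
--     # drops each index into its value's bucket. No sorting needed.
--     buckets = {}
--     for val in a1:
--         buckets.setdefault(val, [])
--     for idx, val in enumerate(a2):
--         buckets[val].append(idx)
--     return [idx for bucket in buckets.values() for idx in bucket]
-- ===== Notes on version B (the rewrite author's own statement) =====
-- stated objective: simpler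
-- what changed: B replaces A's stable sort of (value, index) pairs keyed by a1's first-occurrence index with one bucket per distinct a1 value (dict in insertion order) filled in a single pass over a2 and flattened; intended as faster (no sort), but measured only ~1.4x at the largest size, so not claimed as faster.
import Mathlib
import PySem

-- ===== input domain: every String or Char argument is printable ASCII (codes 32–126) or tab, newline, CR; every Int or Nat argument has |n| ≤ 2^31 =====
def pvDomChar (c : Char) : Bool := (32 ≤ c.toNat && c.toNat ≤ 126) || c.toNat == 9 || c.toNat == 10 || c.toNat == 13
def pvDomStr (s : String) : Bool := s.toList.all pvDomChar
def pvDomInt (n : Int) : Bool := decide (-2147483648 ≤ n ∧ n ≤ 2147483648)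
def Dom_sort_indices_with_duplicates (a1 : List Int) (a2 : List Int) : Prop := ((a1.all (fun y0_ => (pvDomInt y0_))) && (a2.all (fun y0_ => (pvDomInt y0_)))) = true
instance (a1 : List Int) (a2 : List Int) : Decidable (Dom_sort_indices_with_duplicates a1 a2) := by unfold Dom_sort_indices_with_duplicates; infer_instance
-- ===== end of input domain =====

-- B replaces A's stable sort of a2's (value, index) pairs by one bucket of indices per
-- distinct a1 value, filled in a single pass over a2 and flattened in a1's first-occurrence
-- order — simpler: no sort and no key lookup per comparison.

-- ===== PORT A =====
-- order_dict[x[0]] would raise KeyError for a value absent from a1; Pre_ excludes those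
-- inputs, so the total key '(get? …).getD 0' is only ever used where get? is some.
def sort_indices_with_duplicates (a1 : List Int) (a2 : List Int) : List Int :=
  let order_dict : PySem.Dict Int Int :=
    (PySem.List.enumerate a1).foldl
      (fun d p => if d.contains p.2 then d else d.insert p.2 p.1) PySem.Dict.empty
  let indexed_a2 : List (Int × Int) := (PySem.List.enumerate a2).map (fun p => (p.2, p.1))
  let sorted_indexed_a2 :=
    PySem.List.sorted indexed_a2 (fun x => (order_dict.get? x.1).getD 0)
  sorted_indexed_a2.map (fun p => p.2)

-- ===== PORT B =====
-- buckets[val].append(idx) raises KeyError for an a2 value absent from a1, exactly as A's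
-- order_dict[x[0]] does; Pre_ excludes those inputs, where alone 'modify' (which would add
-- the key) differs from Python's raising lookup.
def sort_indices_with_duplicates_alt (a1 : List Int) (a2 : List Int) : List Int :=
  let buckets0 : PySem.Dict Int (List Int) :=
    a1.foldl (fun d v => d.setdefault v []) PySem.Dict.empty
  let buckets :=
    (PySem.List.enumerate a2).foldl
      (fun d p => d.modify p.2 [] (fun l => l ++ [p.1])) buckets0
  buckets.values.flatten

-- ===== PRECONDITION & SPEC =====
-- Pre_ excludes exactly the inputs where some a2 value is absent from a1: there A's
-- order_dict[x[0]] raises KeyError (A returns on no excluded input).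
def Pre_sort_indices_with_duplicates (a1 : List Int) (a2 : List Int) : Prop :=
  ∀ v ∈ a2, v ∈ a1
instance (a1 : List Int) (a2 : List Int) : Decidable (Pre_sort_indices_with_duplicates a1 a2) := by unfold Pre_sort_indices_with_duplicates; infer_instance
def pvWitness_sort_indices_with_duplicates : List Int × List Int := ([1, 2], [2, 1, 2])
def Spec_sort_indices_with_duplicates (a1 : List Int) (a2 : List Int) (out : List Int) : Prop := out = sort_indices_with_duplicates_alt a1 a2
instance (a1 : List Int) (a2 : List Int) (out : List Int) : Decidable (Spec_sort_indices_with_duplicates a1 a2 out) := by unfold Spec_sort_indices_with_duplicates; infer_instance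

-- ===== CLAIM (what is proved, stated in full; the proofs are below) =====
def Claim_equal_sort_indices_with_duplicates : Prop := ∀ (a1 : List Int) (a2 : List Int), Dom_sort_indices_with_duplicates a1 a2 → Pre_sort_indices_with_duplicates a1 a2 → Spec_sort_indices_with_duplicates a1 a2 (sort_indices_with_duplicates a1 a2)

-- ===== LEMMAS AND PROOFS =====

-- The values of a1 in first-occurrence order, skipping those already in the seen-set s
-- (the sequence of values on which B's loop takes its 'extend' branch).
def pvFirsts (s : PySem.Set Int) : List Int → List Int
  | [] => []
  | v :: t => if PySem.Set.contains s v then pvFirsts s t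
              else v :: pvFirsts (PySem.Set.add s v) t

theorem pvFirsts_mem {s : PySem.Set Int} {a : List Int} {v : Int} :
    v ∈ pvFirsts s a ↔ v ∈ a ∧ v ∉ s := by
  induction a generalizing s with
  | nil => simp [pvFirsts]
  | cons w t ih =>
    by_cases hw : w ∈ s
    · rw [pvFirsts, if_pos ((PySem.Set.contains_iff _ _).mpr hw)]
      rw [ih]
      simp only [List.mem_cons]
      constructor
      · rintro ⟨h, hs⟩; exact ⟨Or.inr h, hs⟩
      · rintro ⟨h | h, hs⟩
        · exact absurd (h ▸ hw) hs
        · exact ⟨h, hs⟩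
    · rw [pvFirsts, if_neg (fun hc => hw ((PySem.Set.contains_iff _ _).mp hc))]
      simp only [List.mem_cons, ih]
      constructor
      · rintro (rfl | ⟨h, hs⟩)
        · exact ⟨Or.inl rfl, hw⟩
        · exact ⟨Or.inr h, fun hv => hs ((PySem.Set.mem_add _ _ _).mpr (Or.inl hv))⟩
      · rintro ⟨h | h, hs⟩
        · exact Or.inl h
        · by_cases hvw : v = w
          · exact Or.inl hvw
          · exact Or.inr ⟨h, fun hm => ((PySem.Set.mem_add _ _ _).mp hm).elim hs hvw⟩

theorem pvFirsts_pairwise_idxOf (a : List Int) (s : PySem.Set Int) :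
    (pvFirsts s a).Pairwise (fun u w => a.idxOf u < a.idxOf w) := by
  induction a generalizing s with
  | nil => simp [pvFirsts]
  | cons v t ih =>
    by_cases hv : v ∈ s
    · rw [pvFirsts, if_pos ((PySem.Set.contains_iff _ _).mpr hv)]
      refine (ih s).imp_of_mem ?_
      intro u w hu hw h
      have huv : u ≠ v := fun e => (pvFirsts_mem.mp hu).2 (by rw [e]; exact hv)
      have hwv : w ≠ v := fun e => (pvFirsts_mem.mp hw).2 (by rw [e]; exact hv)
      rw [List.idxOf_cons_ne _ (Ne.symm huv), List.idxOf_cons_ne _ (Ne.symm hwv)]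
      omega
    · rw [pvFirsts, if_neg (fun hc => hv ((PySem.Set.contains_iff _ _).mp hc))]
      have hnv : ∀ x, x ∈ pvFirsts (PySem.Set.add s v) t → x ≠ v := fun x hx e =>
        (pvFirsts_mem.mp hx).2 (by rw [e]; exact (PySem.Set.mem_add _ _ _).mpr (Or.inr rfl))
      constructor
      · intro w hw
        rw [List.idxOf_cons_self, List.idxOf_cons_ne _ (Ne.symm (hnv w hw))]
        omega
      · refine (ih _).imp_of_mem ?_
        intro u w hu hw h
        rw [List.idxOf_cons_ne _ (Ne.symm (hnv u hu)), List.idxOf_cons_ne _ (Ne.symm (hnv w hw))]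
        omega

-- Values of pvFirsts are pairwise distinct.
theorem pvFirsts_nodup (a : List Int) (s : PySem.Set Int) : (pvFirsts s a).Nodup := by
  refine (pvFirsts_pairwise_idxOf a s).imp ?_
  intro u w h e
  subst e
  omega

-- B's first loop: setdefault over a1 appends one empty bucket per fresh value, in order.
theorem pvSetdefaults_items (a : List Int) :
    ∀ d : PySem.Dict Int (List Int),
    (a.foldl (fun d v => d.setdefault v []) d).items
      = d.items ++ (pvFirsts d.keys a).map (fun v => (v, ([] : List Int))) := by
  induction a with
  | nil => intro d; simp [pvFirsts]
  | cons v t ih =>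
    intro d
    rw [List.foldl_cons, pvFirsts]
    by_cases hv : d.contains v = true
    · rw [if_pos ((PySem.Set.contains_iff _ _).mpr
          ((PySem.Dict.contains_iff_mem_keys _ _).mp hv)),
        PySem.Dict.setdefault_of_contains _ _ hv, ih d]
    · have hv' : d.contains v = false := by simpa using hv
      have hmem : v ∉ d.keys := fun h => hv ((PySem.Dict.contains_iff_mem_keys _ _).mpr h)
      have hadd : PySem.Set.add d.keys v = d.keys ++ [v] := by
        rw [PySem.Set.add, if_neg (fun hc => hmem ((PySem.Set.contains_iff _ _).mp hc))]
      rw [if_neg (fun hc => hmem ((PySem.Set.contains_iff _ _).mp hc)),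
        PySem.Dict.setdefault_of_not_contains _ _ hv', ih _,
        PySem.Dict.items_insert_of_not_contains _ _ hv',
        PySem.Dict.keys_insert_of_not_contains _ _ hv', ← hadd]
      simp [List.append_assoc]

-- B's second loop: each index of a2 is appended to its value's bucket; on a dict whose
-- keys cover a2's values this extends every item's bucket with the indices of its key.
theorem pvAppendFold_items (l : List (Int × Int)) :
    ∀ d : PySem.Dict Int (List Int), d.keys.Nodup → (∀ p ∈ l, d.contains p.2 = true) →
    (l.foldl (fun d p => d.modify p.2 [] (fun acc => acc ++ [p.1])) d).items
      = d.items.map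
          (fun q => (q.1, q.2 ++ (l.filter (fun p => p.2 == q.1)).map (fun p => p.1))) := by
  induction l with
  | nil => intro d _ _; simp
  | cons p t ih =>
    intro d hnd hc
    have hcp : d.contains p.2 = true := hc p (by simp)
    have hstep : (d.modify p.2 [] (fun acc => acc ++ [p.1])).items
        = d.items.map (fun q => if q.1 == p.2 then (q.1, q.2 ++ [p.1]) else q) := by
      show (d.insert p.2 ((d.getD p.2 []) ++ [p.1])).items = _
      rw [PySem.Dict.items_insert_of_contains _ _ hcp]
      apply List.map_congr_left
      intro q hq
      by_cases h : q.1 = p.2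
      · have hg : d.get? q.1 = some q.2 :=
          PySem.Dict.get?_of_mem_items d (by simpa using hq) hnd
        have hgd : d.getD p.2 [] = q.2 := by
          rw [← h, PySem.Dict.getD_eq_get?_getD, hg, Option.getD_some]
        simp [h, hgd]
      · simp [h]
    have hnd' : (d.modify p.2 [] (fun acc => acc ++ [p.1])).keys.Nodup := by
      show (d.insert p.2 ((d.getD p.2 []) ++ [p.1])).keys.Nodup
      rw [PySem.Dict.keys_insert_of_contains _ _ hcp]
      exact hnd
    have hc' : ∀ q ∈ t, (d.modify p.2 [] (fun acc => acc ++ [p.1])).contains q.2 = true := by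
      intro q hq
      show (d.insert p.2 ((d.getD p.2 []) ++ [p.1])).contains q.2 = true
      rw [PySem.Dict.contains_insert]
      simp [hc q (by simp [hq])]
    rw [List.foldl_cons, ih _ hnd' hc', hstep, List.map_map]
    apply List.map_congr_left
    intro q hq
    by_cases h : q.1 = p.2
    · simp [Function.comp, h, List.append_assoc]
    · have h2 : (p.2 == q.1) = false := by
        simp only [beq_eq_false_iff_ne]
        exact fun e => h (Eq.symm e)
      simp [Function.comp, h, h2]

-- order_dict maps each value of a1 to its first index in a1.
theorem pvOd_get (a1 : List Int) (v : Int) :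
    (((PySem.List.enumerate a1).foldl
        (fun d p => if d.contains p.2 then d else d.insert p.2 p.1)
        PySem.Dict.empty : PySem.Dict Int Int)).get? v
      = if v ∈ a1 then some ((a1.idxOf v : Nat) : Int) else none := by
  induction a1 using List.reverseRecOn generalizing v with
  | nil => simp [PySem.List.enumerate, PySem.Dict.get?_empty]
  | append_singleton xs w ih =>
    rw [PySem.List.enumerate_append]
    simp only [List.foldl_append]
    set d : PySem.Dict Int Int :=
      (PySem.List.enumerate xs).foldl
        (fun d p => if d.contains p.2 then d else d.insert p.2 p.1) PySem.Dict.empty with hd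
    have hcont : d.contains w = decide (w ∈ xs) := by
      rw [PySem.Dict.contains_eq_isSome_get?, ih w]
      by_cases hw : w ∈ xs <;> simp [hw]
    simp only [PySem.List.enumerate, List.foldl_cons, List.foldl_nil, hcont]
    by_cases hw : w ∈ xs
    · simp only [hw, decide_true, if_true, ih v]
      by_cases hv : v ∈ xs
      · rw [if_pos hv, if_pos (List.mem_append_left _ hv),
            List.idxOf_append_of_mem hv]
      · have hvw : v ≠ w := by rintro rfl; exact hv hw
        rw [if_neg hv, if_neg (by simp [hv, hvw])]
    · simp only [hw, decide_false]
      rw [if_neg Bool.false_ne_true, PySem.Dict.get?_insert]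
      by_cases hvw : v = w
      · subst hvw
        rw [if_pos rfl, if_pos (List.mem_append_right _ (by simp)),
            List.idxOf_append_of_notMem hw]
        simp
      · rw [if_neg hvw, ih v]
        by_cases hv : v ∈ xs
        · rw [if_pos hv, if_pos (List.mem_append_left _ hv),
              List.idxOf_append_of_mem hv]
        · rw [if_neg hv, if_neg (by simp [hv, hvw])]

-- Inserting x into a key-grouped list appends it at the end of its key's group.
theorem pvInsertBy_append_not {α : Type} (before : α → α → Bool) (x : α) (l r : List α)
    (h : ∀ y ∈ l, before x y = false) :
    PySem.List.insertBy before x (l ++ r) = l ++ PySem.List.insertBy before x r := by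
  induction l with
  | nil => simp
  | cons y t ih =>
    have hy : before x y = false := h y (by simp)
    rw [List.cons_append,
        show PySem.List.insertBy before x (y :: (t ++ r))
          = if before x y then x :: y :: (t ++ r)
            else y :: PySem.List.insertBy before x (t ++ r) from rfl,
        hy]
    rw [if_neg Bool.false_ne_true, ih (fun y hy => h y (by simp [hy])), List.cons_append]

theorem pvInsertBy_all_before {α : Type} (before : α → α → Bool) (x : α) (r : List α)
    (h : ∀ y ∈ r, before x y = true) :
    PySem.List.insertBy before x r = x :: r := by
  cases r with
  | nil => rfl
  | cons y t => simp [PySem.List.insertBy, h y (by simp)]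

theorem pvInsertBy_grouped {α : Type} (key : α → Int) (x : α) (ks : List Int)
    (G : Int → List α)
    (hG : ∀ k ∈ ks, ∀ y ∈ G k, key y = k)
    (hks : ks.Pairwise (· < ·)) (hx : key x ∈ ks) :
    PySem.List.insertBy (fun a b => decide (key a < key b)) x (ks.flatMap G)
      = ks.flatMap (fun k => G k ++ if key x == k then [x] else []) := by
  induction ks with
  | nil => cases hx
  | cons k ks' ih =>
    have hlt : ∀ k' ∈ ks', k < k' := fun k' hk' => List.rel_of_pairwise_cons hks hk' 
    simp only [List.flatMap_cons]
    by_cases hk : key x = k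
    · have h1 : ∀ y ∈ G k, (decide (key x < key y)) = false := by
        intro y hy
        rw [hG k (by simp) y hy, hk]
        simp
      rw [pvInsertBy_append_not _ _ _ _ h1]
      have h2 : ∀ y ∈ ks'.flatMap G, (decide (key x < key y)) = true := by
        intro y hy
        rcases List.mem_flatMap.mp hy with ⟨k', hk', hyk'⟩
        rw [hG k' (by simp [hk']) y hyk', hk]
        simpa using hlt k' hk'
      rw [pvInsertBy_all_before _ _ _ h2]
      have h3 : ks'.flatMap (fun k => G k ++ if key x == k then [x] else [])
          = ks'.flatMap G := by
        apply List.flatMap_congr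
        intro k' hk'
        have : key x ≠ k' := by
          have := hlt k' hk'; omega
        simp [this]
      rw [h3, hk]
      simp
    · have hx' : key x ∈ ks' := by
        rcases List.mem_cons.mp hx with h | h
        · exact absurd h hk
        · exact h
      have hkx : k < key x := hlt _ hx'
      have h1 : ∀ y ∈ G k, (decide (key x < key y)) = false := by
        intro y hy
        rw [hG k (by simp) y hy]
        simp; omega
      rw [pvInsertBy_append_not _ _ _ _ h1,
          ih (fun k' hk' => hG k' (by simp [hk'])) hks.of_cons hx']
      have : (key x == k) = false := by simp [hk]
      simp [this]

-- A stable sort by key groups the elements by key, in increasing key order,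
-- preserving the original order inside each group.
theorem pvStableSort_grouped {α : Type} (xs : List α) (key : α → Int) (ks : List Int)
    (hks : ks.Pairwise (· < ·)) (hcov : ∀ p ∈ xs, key p ∈ ks) :
    PySem.List.sorted xs key
      = ks.flatMap (fun k => xs.filter (fun p => key p == k)) := by
  induction xs using List.reverseRecOn with
  | nil => simp [PySem.List.sorted_eq_foldl_insertBy]
  | append_singleton t x ih =>
    have hsorted : PySem.List.sorted (t ++ [x]) key
        = PySem.List.insertBy (fun a b => decide (key a < key b)) x
            (PySem.List.sorted t key) := by
      rw [PySem.List.sorted_eq_foldl_insertBy, PySem.List.sorted_eq_foldl_insertBy,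
          List.foldl_append]
      rfl
    rw [hsorted, ih (fun p hp => hcov p (List.mem_append_left _ hp)),
        pvInsertBy_grouped key x ks _
          (fun k _ y hy => by simpa using (List.mem_filter.mp hy).2)
          hks (hcov x (List.mem_append_right _ (by simp)))]
    apply List.flatMap_congr
    intro k _
    rw [List.filter_append]
    simp [List.filter_cons]

-- ===== VERDICT (by name: the statement is the Claim_ definition above) =====
theorem sort_indices_with_duplicates_spec : Claim_equal_sort_indices_with_duplicates := by
  intro a1 a2 _ hpre
  unfold Spec_sort_indices_with_duplicates
  have hA : sort_indices_with_duplicates a1 a2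
      = (PySem.List.sorted ((PySem.List.enumerate a2).map (fun p => (p.2, p.1)))
          (fun x => (((PySem.List.enumerate a1).foldl
              (fun d p => if d.contains p.2 then d else d.insert p.2 p.1)
              PySem.Dict.empty).get? x.1).getD 0)).map (fun p => p.2) := rfl
  have hB : sort_indices_with_duplicates_alt a1 a2
      = ((PySem.List.enumerate a2).foldl
          (fun d p => d.modify p.2 [] (fun l => l ++ [p.1]))
          (a1.foldl (fun d v => d.setdefault v []) PySem.Dict.empty)).values.flatten := rfl
  rw [hA, hB]
  set od : PySem.Dict Int Int :=
    (PySem.List.enumerate a1).foldl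
      (fun d p => if d.contains p.2 then d else d.insert p.2 p.1) PySem.Dict.empty with hod
  set xs : List (Int × Int) := (PySem.List.enumerate a2).map (fun p => (p.2, p.1)) with hxs
  set key : Int × Int → Int := fun x => (od.get? x.1).getD 0 with hkey
  -- every pair of xs carries a value of a2, hence (by Pre_) of a1
  have hmem1 : ∀ p ∈ xs, p.1 ∈ a1 := by
    intro p hp
    rcases List.mem_map.mp hp with ⟨q, hq, rfl⟩
    rcases (PySem.List.mem_enumerate_iff ..).mp hq with ⟨i, hi, rfl⟩
    exact hpre _ (List.getElem_mem hi)
  have hkeyval : ∀ p ∈ xs, key p = ((a1.idxOf p.1 : Nat) : Int) := by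
    intro p hp
    show (od.get? p.1).getD 0 = _
    rw [hod, pvOd_get a1 p.1, if_pos (hmem1 p hp), Option.getD_some]
  -- the group keys: first-occurrence indices of a1's fresh values
  set D : List Int := pvFirsts PySem.Set.empty a1 with hD
  set ks : List Int := D.map (fun v => ((a1.idxOf v : Nat) : Int)) with hks
  have hDmem : ∀ v, v ∈ D ↔ v ∈ a1 := by
    intro v
    rw [hD, pvFirsts_mem]
    simp [PySem.Set.empty]
  have hkspw : ks.Pairwise (· < ·) := by
    rw [hks, List.pairwise_map]
    refine (pvFirsts_pairwise_idxOf a1 PySem.Set.empty).imp ?_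
    intro u w h
    exact_mod_cast h
  have hcov : ∀ p ∈ xs, key p ∈ ks := by
    intro p hp
    rw [hkeyval p hp, hks]
    exact List.mem_map.mpr ⟨p.1, (hDmem p.1).mpr (hmem1 p hp), rfl⟩
  -- B's side: the buckets dict, in items form
  have hitems0 : (a1.foldl (fun d v => d.setdefault v []) (PySem.Dict.empty : PySem.Dict Int (List Int))).items
      = D.map (fun v => (v, ([] : List Int))) := by
    rw [pvSetdefaults_items a1 PySem.Dict.empty]
    simp [PySem.Dict.empty, PySem.Dict.keys, hD, PySem.Set.empty]
  have hkeys0 : (a1.foldl (fun d v => d.setdefault v []) (PySem.Dict.empty : PySem.Dict Int (List Int))).keys = D := by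
    show ((a1.foldl (fun d v => d.setdefault v []) (PySem.Dict.empty : PySem.Dict Int (List Int))).items).map (fun q => q.1) = D
    rw [hitems0, List.map_map]
    exact List.map_id' D
  have hitems : ((PySem.List.enumerate a2).foldl
        (fun d p => d.modify p.2 [] (fun l => l ++ [p.1]))
        (a1.foldl (fun d v => d.setdefault v []) (PySem.Dict.empty : PySem.Dict Int (List Int)))).items
      = D.map (fun v => (v, ((PySem.List.enumerate a2).filter
          (fun p => p.2 == v)).map (fun p => p.1))) := by
    rw [pvAppendFold_items _ _ (by rw [hkeys0]; exact pvFirsts_nodup a1 PySem.Set.empty) ?_,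
        hitems0, List.map_map]
    · simp
    · intro p hp
      rw [PySem.Dict.contains_iff_mem_keys, hkeys0, hDmem]
      rcases (PySem.List.mem_enumerate_iff ..).mp hp with ⟨i, hi, rfl⟩
      exact hpre _ (List.getElem_mem hi)
  rw [pvStableSort_grouped xs key ks hkspw hcov, List.map_flatMap, hks,
      List.flatMap_map, PySem.Dict.values, hitems, List.map_map, List.flatten_eq_flatMap,
      List.flatMap_map]
  apply List.flatMap_congr
  intro v hv
  have hfilter : xs.filter (fun p => key p == ((a1.idxOf v : Nat) : Int))
      = xs.filter (fun p => p.1 == v) := by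
    apply List.filter_congr
    intro p hp
    rw [hkeyval p hp]
    by_cases h : p.1 = v
    · rw [h]; simp
    · have h2 : a1.idxOf p.1 ≠ a1.idxOf v :=
        fun h2 => h ((List.idxOf_inj (hmem1 p hp)).mp h2)
      have hne : ((a1.idxOf p.1 : Nat) : Int) ≠ ((a1.idxOf v : Nat) : Int) := by
        exact_mod_cast h2
      simp [h, hne]
  show (List.filter (fun p => key p == ((a1.idxOf v : Nat) : Int)) xs).map (fun p => p.2)
      = ((PySem.List.enumerate a2).filter (fun p => p.2 == v)).map (fun p => p.1)
  rw [hfilter, hxs, List.filter_map, List.map_map]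
  rfl
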